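-- pv_equiv track=rewrite | github.com/AyyyStew/FindingTheFinger_2 | scripts/dimreduction/shared.py | compute_leaf_ancestors
-- ===== SOURCE A (Python) =====
-- def compute_leaf_ancestors(
--     leaf_ids: list[int],
--     parent_of: dict[int, int],
--     height_of: dict[int, int],
--     max_height: int,
-- ) -> dict[int, dict[int, int]]:
--     result: dict[int, dict[int, int]] = {}
--     for leaf_id in leaf_ids:
--         ancestors: dict[int, int] = {}
--         cur = leaf_id
--         while cur in parent_of:
--             cur = parent_of[cur]
--             h = height_of.get(cur, -1)
--             if 1 <= h <= max_height:
--                 ancestors[h] = cur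
--         result[leaf_id] = ancestors
--     return result
-- ===== SOURCE B (Python) =====
-- def compute_leaf_ancestors(
--     leaf_ids: list[int],
--     parent_of: dict[int, int],
--     height_of: dict[int, int],
--     max_height: int,
-- ) -> dict[int, dict[int, int]]:
--     # Memoized: each node's ancestor table is derived once from its parent's
--     # table, so shared path suffixes are not re-walked.
--     cache: dict[int, dict[int, int]] = {}
--     result: dict[int, dict[int, int]] = {}
--     for leaf_id in leaf_ids:
--         # climb until we hit a node with a known table (or a root)
--         stack = []
--         cur = leaf_id
--         while cur not in cache and cur in parent_of:
--             stack.append(cur)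
--             cur = parent_of[cur]
--         if cur not in cache:
--             cache[cur] = {}
--         # fill the collected path top-down, each node from its parent's table
--         for node in reversed(stack):
--             p = parent_of[node]
--             base = cache[p]
--             h = height_of.get(p, -1)
--             if 1 <= h <= max_height:
--                 d = {h: base.get(h, p)}
--                 d.update((k, v) for k, v in base.items() if k != h)
--             else:
--                 d = base
--             cache[node] = d
--         result[leaf_id] = cache[leaf_id]
--     return result
-- ===== Notes on version B (the rewrite author's own statement) =====
-- stated objective: alternative
-- what changed: Instead of re-walking the whole parent chain per leaf and threading an accumulator dict, B memoizes each node's ancestor table in a cache and derives a node's table from its parent's table in one merge step, so shared chain suffixes and duplicate leaf ids are computed once; on inputs with little chain sharing the cost is the same.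
import Mathlib
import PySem

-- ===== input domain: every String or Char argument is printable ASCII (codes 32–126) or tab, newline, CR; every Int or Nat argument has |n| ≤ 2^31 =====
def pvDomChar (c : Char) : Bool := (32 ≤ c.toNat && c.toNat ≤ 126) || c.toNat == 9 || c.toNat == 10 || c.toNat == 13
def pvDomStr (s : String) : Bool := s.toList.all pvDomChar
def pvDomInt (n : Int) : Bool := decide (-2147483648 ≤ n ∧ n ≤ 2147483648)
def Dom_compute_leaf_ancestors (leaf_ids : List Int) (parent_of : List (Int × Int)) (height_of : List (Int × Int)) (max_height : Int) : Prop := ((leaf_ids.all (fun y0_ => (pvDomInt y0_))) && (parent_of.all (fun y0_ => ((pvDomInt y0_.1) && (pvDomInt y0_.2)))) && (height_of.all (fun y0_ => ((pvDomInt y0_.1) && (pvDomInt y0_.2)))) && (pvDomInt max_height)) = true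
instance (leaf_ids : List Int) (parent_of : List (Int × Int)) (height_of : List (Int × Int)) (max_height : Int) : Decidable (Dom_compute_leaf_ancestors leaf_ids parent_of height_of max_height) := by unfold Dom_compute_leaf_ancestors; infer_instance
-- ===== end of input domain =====

-- B memoizes each node's ancestor table, deriving it once from its parent's table instead of
-- re-walking the whole chain per leaf (a different algorithm, same measured cost); equivalence
-- of return values is proved on all inputs where A's while loop terminates (Pre_ below).

-- ===== PORT A =====
-- A's inner while loop: walk up the parent chain, recording in-range heights (later = higher wins).
-- Fuel parent_of.length + 1 suffices on every input where the Python loop terminates (Pre_).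
def pvWalkA (pd hd : PySem.Dict Int Int) (maxh : Int) :
    Nat → Int → PySem.Dict Int Int → PySem.Dict Int Int
  | 0, _, acc => acc
  | f+1, cur, acc =>
    match pd.get? cur with
    | none => acc
    | some p =>
      let h := hd.getD p (-1)
      pvWalkA pd hd maxh f p (if 1 ≤ h ∧ h ≤ maxh then acc.insert h p else acc)

def compute_leaf_ancestors (leaf_ids : List Int) (parent_of : List (Int × Int)) (height_of : List (Int × Int)) (max_height : Int) : List (Int × List (Int × Int)) :=
  let pd : PySem.Dict Int Int := PySem.Dict.mk parent_of
  let hd : PySem.Dict Int Int := PySem.Dict.mk height_of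
  let result := leaf_ids.foldl
    (fun r leaf => r.insert leaf (pvWalkA pd hd max_height (parent_of.length + 1) leaf PySem.Dict.empty))
    PySem.Dict.empty
  result.items.map (fun kv => (kv.1, kv.2.items))

-- ===== PORT B =====
-- the 'while cur not in cache and cur in parent_of' climb, stacking the uncached path
def pvCollect (cache : PySem.Dict Int (PySem.Dict Int Int)) (pd : PySem.Dict Int Int) :
    Nat → Int → List Int → (List Int × Int)
  | 0, cur, stack => (stack, cur)
  | f+1, cur, stack =>
    if !cache.contains cur && pd.contains cur then
      pvCollect cache pd f (pd.getD cur 0) (stack ++ [cur])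
    else (stack, cur)

-- one step of the top-down fill: node's table from its parent's table
def pvFillStep (pd hd : PySem.Dict Int Int) (maxh : Int)
    (cache : PySem.Dict Int (PySem.Dict Int Int)) (node : Int) : PySem.Dict Int (PySem.Dict Int Int) :=
  let p := pd.getD node 0                         -- parent_of[node]; every stacked node is a key of parent_of
  let base := cache.getD p PySem.Dict.empty       -- cache[p]; the parent's table was filled first
  let h := hd.getD p (-1)
  let d := if 1 ≤ h ∧ h ≤ maxh then
      (PySem.Dict.insert PySem.Dict.empty h (base.getD h p)).update
        (base.items.filter (fun kv => kv.1 != h))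
    else base
  cache.insert node d

def pvProcessLeaf (pd hd : PySem.Dict Int Int) (maxh : Int) (F : Nat)
    (cache : PySem.Dict Int (PySem.Dict Int Int)) (leaf : Int) : PySem.Dict Int (PySem.Dict Int Int) :=
  let se := pvCollect cache pd F leaf []
  let c1 := if cache.contains se.2 then cache else cache.insert se.2 PySem.Dict.empty
  se.1.reverse.foldl (pvFillStep pd hd maxh) c1

def compute_leaf_ancestors_alt (leaf_ids : List Int) (parent_of : List (Int × Int)) (height_of : List (Int × Int)) (max_height : Int) : List (Int × List (Int × Int)) :=
  let pd : PySem.Dict Int Int := PySem.Dict.mk parent_of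
  let hd : PySem.Dict Int Int := PySem.Dict.mk height_of
  let rc := leaf_ids.foldl
    (fun (rc : PySem.Dict Int (PySem.Dict Int Int) × PySem.Dict Int (PySem.Dict Int Int)) leaf =>
      let c' := pvProcessLeaf pd hd max_height (parent_of.length + 1) rc.2 leaf
      (rc.1.insert leaf (c'.getD leaf PySem.Dict.empty), c'))
    (PySem.Dict.empty, PySem.Dict.empty)
  rc.1.items.map (fun kv => (kv.1, kv.2.items))

-- ===== PRECONDITION & SPEC =====
-- the parent map as a function (nodes outside parent_of are fixed points)
def pvParent (parent_of : List (Int × Int)) (x : Int) : Int := (PySem.Dict.mk parent_of).getD x x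

-- Pre_ excludes exactly the inputs on which A's 'while cur in parent_of' loop never terminates
-- (a parent cycle reachable from some leaf): a terminating chain visits pairwise-distinct keys,
-- hence leaves the key set within parent_of.length steps.
def Pre_compute_leaf_ancestors (leaf_ids : List Int) (parent_of : List (Int × Int)) (height_of : List (Int × Int)) (max_height : Int) : Prop :=
  ∀ l ∈ leaf_ids, ∃ n < parent_of.length + 1, (pvParent parent_of)^[n] l ∉ (PySem.Dict.mk parent_of).keys
instance (leaf_ids : List Int) (parent_of : List (Int × Int)) (height_of : List (Int × Int)) (max_height : Int) : Decidable (Pre_compute_leaf_ancestors leaf_ids parent_of height_of max_height) := by unfold Pre_compute_leaf_ancestors; infer_instance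

def pvWitness_compute_leaf_ancestors : List Int × (List (Int × Int)) × (List (Int × Int)) × Int :=
  ([1, 4], [(1, 2), (2, 3)], [(2, 1), (3, 2)], 2)

def Spec_compute_leaf_ancestors (leaf_ids : List Int) (parent_of : List (Int × Int)) (height_of : List (Int × Int)) (max_height : Int) (out : List (Int × List (Int × Int))) : Prop := out = compute_leaf_ancestors_alt leaf_ids parent_of height_of max_height
instance (leaf_ids : List Int) (parent_of : List (Int × Int)) (height_of : List (Int × Int)) (max_height : Int) (out : List (Int × List (Int × Int))) : Decidable (Spec_compute_leaf_ancestors leaf_ids parent_of height_of max_height out) := by unfold Spec_compute_leaf_ancestors; infer_instance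

-- ===== CLAIM (what is proved, stated in full; the proofs are below) =====
def Claim_equal_compute_leaf_ancestors : Prop := ∀ (leaf_ids : List Int) (parent_of : List (Int × Int)) (height_of : List (Int × Int)) (max_height : Int), Dom_compute_leaf_ancestors leaf_ids parent_of height_of max_height → Pre_compute_leaf_ancestors leaf_ids parent_of height_of max_height → Spec_compute_leaf_ancestors leaf_ids parent_of height_of max_height (compute_leaf_ancestors leaf_ids parent_of height_of max_height)

-- ===== LEMMAS AND PROOFS =====

-- pvEscapes pd f cur: walking up parents from cur leaves the key set of pd within f steps
def pvEscapes (pd : PySem.Dict Int Int) : Nat → Int → Bool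
  | 0, cur => !pd.contains cur
  | f+1, cur => !pd.contains cur || pvEscapes pd f (pd.getD cur 0)

-- the ancestor chain of a node (parents, nearest first), fuel-bounded
def pvChain (pd : PySem.Dict Int Int) : Nat → Int → List Int
  | 0, _ => []
  | f+1, cur =>
    match pd.get? cur with
    | none => []
    | some p => p :: pvChain pd f p

def pvPairs (hd : PySem.Dict Int Int) (maxh : Int) (l : List Int) : List (Int × Int) :=
  l.filterMap (fun p =>
    let h := hd.getD p (-1)
    if 1 ≤ h ∧ h ≤ maxh then some (h, p) else none)

def pvBuild (prs : List (Int × Int)) (a : PySem.Dict Int Int) : PySem.Dict Int Int :=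
  prs.foldl (fun a kv => a.insert kv.1 kv.2) a

-- the table A computes for node n (the common specification both ports are related to)
def pvSpecAnc (pd hd : PySem.Dict Int Int) (maxh : Int) (F : Nat) (n : Int) : PySem.Dict Int Int :=
  pvBuild (pvPairs hd maxh (pvChain pd F n)) PySem.Dict.empty

lemma pvWalkA_eq_build (pd hd : PySem.Dict Int Int) (maxh : Int) :
    ∀ (f : Nat) (cur : Int) (acc : PySem.Dict Int Int),
      pvWalkA pd hd maxh f cur acc = pvBuild (pvPairs hd maxh (pvChain pd f cur)) acc := by
  intro f
  induction f with
  | zero => intro cur acc; simp [pvWalkA, pvChain, pvPairs, pvBuild]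
  | succ f ih =>
    intro cur acc
    simp only [pvWalkA, pvChain]
    cases h : pd.get? cur with
    | none => simp [pvPairs, pvBuild]
    | some p =>
      simp only [ih, pvPairs, List.filterMap_cons]
      split_ifs <;> simp [pvBuild]

lemma pvEscapes_succ (pd : PySem.Dict Int Int) :
    ∀ (f : Nat) (cur : Int), pvEscapes pd f cur = true → pvEscapes pd (f+1) cur = true := by
  intro f
  induction f with
  | zero => intro cur h; simp [pvEscapes] at h ⊢; exact Or.inl h
  | succ f ih =>
    intro cur h
    simp only [pvEscapes] at h ⊢
    rcases Bool.or_eq_true_iff.mp h with h1 | h2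
    · exact Bool.or_eq_true_iff.mpr (Or.inl h1)
    · exact Bool.or_eq_true_iff.mpr (Or.inr (ih _ h2))

lemma pvEscapes_le (pd : PySem.Dict Int Int) :
    ∀ (f g : Nat) (cur : Int), f ≤ g → pvEscapes pd f cur = true → pvEscapes pd g cur = true := by
  intro f g cur hle h
  induction g, hle using Nat.le_induction with
  | base => exact h
  | succ g _ ih => exact pvEscapes_succ pd g cur ih

lemma pv_not_contains_get? (pd : PySem.Dict Int Int) (cur : Int) (h : pd.contains cur = false) :
    pd.get? cur = none := by
  rw [PySem.Dict.contains_eq_isSome_get?] at h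
  exact Option.not_isSome_iff_eq_none.mp (by simp [h])

lemma pvChain_stable (pd : PySem.Dict Int Int) :
    ∀ (f : Nat) (cur : Int), pvEscapes pd f cur = true → pvChain pd (f+1) cur = pvChain pd f cur := by
  intro f
  induction f with
  | zero =>
    intro cur h
    simp only [pvEscapes, Bool.not_eq_true'] at h
    simp [pvChain, pv_not_contains_get? pd cur h]
  | succ f ih =>
    intro cur h
    cases hq : pd.get? cur with
    | none =>
      conv_lhs => rw [pvChain]
      conv_rhs => rw [pvChain]
      simp [hq]
    | some p =>
      have hc : pd.contains cur = true := by
        rw [PySem.Dict.contains_eq_isSome_get?, hq]; rfl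
      simp only [pvEscapes, hc, Bool.not_true, Bool.false_or] at h
      have hgd : pd.getD cur 0 = p := PySem.Dict.getD_of_get?_eq_some pd 0 hq
      rw [hgd] at h
      conv_lhs => rw [pvChain]
      conv_rhs => rw [pvChain]
      simp only [hq]
      rw [ih p h]

lemma pv_find_filter_ne (x k : Int) (h : x ≠ k) : ∀ (L : List (Int × Int)),
    List.find? (fun kv => kv.1 == x) (L.filter (fun kv => !(kv.1 == k)))
      = List.find? (fun kv => kv.1 == x) L := by
  intro L
  induction L with
  | nil => simp
  | cons kv L ih =>
    by_cases hk : kv.1 = k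
    · have hpx : ¬ (kv.1 == x) = true := by simp [hk]; exact Ne.symm h
      rw [List.filter_cons, if_neg (by simp [hk]), List.find?_cons_of_neg (p := fun kv : Int × Int => kv.1 == x) (a := kv) hpx, ih]
    · rw [List.filter_cons, if_pos (by simp [hk])]
      by_cases hx : kv.1 = x
      · rw [List.find?_cons_of_pos (p := fun kv : Int × Int => kv.1 == x) (a := kv) (by simp [hx]), List.find?_cons_of_pos (p := fun kv : Int × Int => kv.1 == x) (a := kv) (by simp [hx])]
      · rw [List.find?_cons_of_neg (p := fun kv : Int × Int => kv.1 == x) (a := kv) (by simp [hx]), List.find?_cons_of_neg (p := fun kv : Int × Int => kv.1 == x) (a := kv) (by simp [hx]), ih]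

lemma pvCollect_append (cache : PySem.Dict Int (PySem.Dict Int Int)) (pd : PySem.Dict Int Int) :
    ∀ (f : Nat) (cur : Int) (s : List Int),
      pvCollect cache pd f cur s = (s ++ (pvCollect cache pd f cur []).1, (pvCollect cache pd f cur []).2) := by
  intro f
  induction f with
  | zero => intro cur s; simp [pvCollect]
  | succ f ih =>
    intro cur s
    simp only [pvCollect]
    split_ifs with hc
    · rw [ih _ (s ++ [cur]), ih _ ([] ++ [cur])]
      simp
    · simp

lemma pv_mem_items_contains (a : PySem.Dict Int Int) {kv : Int × Int} (h : kv ∈ a.items) :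
    a.contains kv.1 = true := by
  simp only [PySem.Dict.contains, List.any_eq_true]
  exact ⟨kv, h, by simp⟩

lemma pvBuild_cons (k w : Int) (rest : List (Int × Int)) (a : PySem.Dict Int Int) :
    pvBuild ((k,w)::rest) a = pvBuild rest (a.insert k w) := rfl

lemma pvBuild_from (prs : List (Int × Int)) :
    ∀ (a : PySem.Dict Int Int), a.keys.Nodup →
      pvBuild prs a = PySem.Dict.mk
        (a.items.map (fun kv => (kv.1, (pvBuild prs PySem.Dict.empty).getD kv.1 kv.2))
          ++ (pvBuild prs PySem.Dict.empty).items.filter (fun kv => !a.contains kv.1)) := by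
  induction prs with
  | nil =>
    intro a ha
    simp only [pvBuild, List.foldl_nil]
    rw [PySem.Dict.ext_iff]
    have h1 : ∀ kv : Int × Int, (kv.1, (PySem.Dict.empty : PySem.Dict Int Int).getD kv.1 kv.2) = kv :=
      fun kv => by rw [PySem.Dict.getD_empty]
    have h2 : a.items.map (fun kv : Int × Int => (kv.1, (PySem.Dict.empty : PySem.Dict Int Int).getD kv.1 kv.2)) = a.items := by
      rw [show (fun kv : Int × Int => (kv.1, (PySem.Dict.empty : PySem.Dict Int Int).getD kv.1 kv.2)) = id from funext h1, List.map_id]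
    rw [h2]
    simp [PySem.Dict.empty]
  | cons kw rest ih =>
    intro a ha
    obtain ⟨k, w⟩ := kw
    have hsing : ((PySem.Dict.empty : PySem.Dict Int Int).insert k w).items = [(k, w)] := by
      rw [PySem.Dict.items_insert_of_not_contains _ w (by simp)]
      simp [PySem.Dict.empty]
    have hE2 : pvBuild ((k,w)::rest) PySem.Dict.empty
        = PySem.Dict.mk ((k, (pvBuild rest PySem.Dict.empty).getD k w)
            :: (pvBuild rest PySem.Dict.empty).items.filter (fun kv => !(kv.1 == k))) := by
      rw [pvBuild_cons, ih _ (PySem.Dict.nodup_keys_insert _ _ _ PySem.Dict.nodup_keys_empty)]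
      rw [hsing]
      congr 1
      simp only [List.map_cons, List.map_nil, List.singleton_append]
      congr 1
      apply List.filter_congr
      intro x _
      simp only [PySem.Dict.contains, hsing, List.any_cons, List.any_nil, Bool.or_false]
      by_cases hxk : x.1 = k
      · simp [hxk]
      · rw [beq_eq_false_iff_ne.mpr (fun e => hxk e.symm), beq_eq_false_iff_ne.mpr hxk]
    set E := pvBuild rest PySem.Dict.empty with hE
    have hgk : ∀ v, (pvBuild ((k,w)::rest) PySem.Dict.empty).getD k v = E.getD k w := by
      intro v
      rw [hE2]
      simp [PySem.Dict.getD, PySem.Dict.get?, List.find?]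
    have hgx : ∀ x v, x ≠ k → (pvBuild ((k,w)::rest) PySem.Dict.empty).getD x v = E.getD x v := by
      intro x v hx
      rw [hE2]
      simp only [PySem.Dict.getD, PySem.Dict.get?]
      rw [List.find?_cons_of_neg (p := fun kv : Int × Int => kv.1 == x) (by simp; exact Ne.symm hx)]
      rw [pv_find_filter_ne x k hx]
    have hitems : (pvBuild ((k,w)::rest) PySem.Dict.empty).items
        = (k, E.getD k w) :: E.items.filter (fun kv => !(kv.1 == k)) := by rw [hE2]
    rw [pvBuild_cons, ih (a.insert k w) (PySem.Dict.nodup_keys_insert a k w ha)]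
    congr 1
    by_cases hc : a.contains k = true
    · rw [PySem.Dict.items_insert_of_contains a w hc, List.map_map]
      have hleft : a.items.map ((fun kv : Int × Int => (kv.1, E.getD kv.1 kv.2)) ∘ (fun p : Int × Int => if (p.1 == k) = true then (k, w) else p))
          = a.items.map (fun kv : Int × Int => (kv.1, (pvBuild ((k,w)::rest) PySem.Dict.empty).getD kv.1 kv.2)) := by
        apply List.map_congr_left
        intro kv hkv
        by_cases hx : kv.1 = k
        · simp [Function.comp, hx, hgk]
        · simp [Function.comp, hx, hgx _ _ hx]
      rw [hleft]
      congr 1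
      rw [hitems, List.filter_cons, if_neg (by simp [hc]), List.filter_filter]
      apply List.filter_congr
      intro x _
      rw [PySem.Dict.contains_insert]
      cases h1 : (x.1 == k) <;> cases h2 : a.contains x.1 <;> simp
    · rw [PySem.Dict.items_insert_of_not_contains a w (by simpa using hc), List.map_append]
      rw [hitems, List.filter_cons, if_pos (by simpa using hc), List.append_assoc]
      congr 1
      · apply List.map_congr_left
        intro kv hkv
        have hne : kv.1 ≠ k := by
          intro he
          rw [← he] at hc
          exact hc (pv_mem_items_contains a hkv)
        simp [hgx _ _ hne]
      · simp only [List.map_cons, List.map_nil, List.singleton_append]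
        congr 1
        rw [List.filter_filter]
        apply List.filter_congr
        intro x _
        rw [PySem.Dict.contains_insert]
        cases h1 : (x.1 == k) <;> cases h2 : a.contains x.1 <;> simp

lemma pvBuild_nodup (prs : List (Int × Int)) (a : PySem.Dict Int Int) (ha : a.keys.Nodup) :
    (pvBuild prs a).keys.Nodup :=
  PySem.Dict.nodup_keys_foldl_insert_key prs Prod.fst (fun _ kv => kv.2) a ha

lemma pvSpecAnc_nodup (pd hd : PySem.Dict Int Int) (maxh : Int) (F : Nat) (n : Int) :
    (pvSpecAnc pd hd maxh F n).keys.Nodup :=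
  pvBuild_nodup _ _ PySem.Dict.nodup_keys_empty

lemma pvFillStep_d (h p : Int)
    (base : PySem.Dict Int Int) (hb : base.keys.Nodup) :
    (PySem.Dict.insert PySem.Dict.empty h (base.getD h p)).update
        (base.items.filter (fun kv => kv.1 != h))
      = PySem.Dict.mk ((h, base.getD h p) :: base.items.filter (fun kv => !(kv.1 == h))) := by
  have hsing : ((PySem.Dict.empty : PySem.Dict Int Int).insert h (base.getD h p)).items
      = [(h, base.getD h p)] := by
    rw [PySem.Dict.items_insert_of_not_contains _ _ (by simp)]
    simp [PySem.Dict.empty]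
  rw [PySem.Dict.ext_iff]
  show (PySem.Dict.update _ _).items = _
  rw [PySem.Dict.update]
  rw [PySem.Dict.items_foldl_insert_fresh (base.items.filter (fun kv => kv.1 != h)) Prod.fst Prod.snd _
      (by
        intro q hq
        have hne : q.1 ≠ h := by
          have := List.of_mem_filter hq
          simpa using this
        simp only [PySem.Dict.contains, hsing, List.any_cons, List.any_nil, Bool.or_false]
        simp [Ne.symm hne])
      (by
        have hs : ((List.filter (fun kv => kv.1 != h) base.items).map Prod.fst).Sublist (base.items.map Prod.fst) :=
          List.Sublist.map Prod.fst List.filter_sublist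
        exact hs.nodup hb)]
  rw [hsing]
  rw [show (fun a : Int × Int => (a.1, a.2)) = id from funext (fun q => rfl), List.map_id]
  rw [List.singleton_append]
  rfl

lemma pvBuild_cons_empty (k w : Int) (rest : List (Int × Int)) :
    pvBuild ((k,w)::rest) PySem.Dict.empty
      = PySem.Dict.mk ((k, (pvBuild rest PySem.Dict.empty).getD k w)
          :: (pvBuild rest PySem.Dict.empty).items.filter (fun kv => !(kv.1 == k))) := by
  have hsing : ((PySem.Dict.empty : PySem.Dict Int Int).insert k w).items = [(k, w)] := by
    rw [PySem.Dict.items_insert_of_not_contains _ w (by simp)]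
    simp [PySem.Dict.empty]
  rw [pvBuild_cons, pvBuild_from rest _ (PySem.Dict.nodup_keys_insert _ _ _ PySem.Dict.nodup_keys_empty)]
  rw [hsing]
  congr 1
  simp only [List.map_cons, List.map_nil, List.singleton_append]
  congr 1
  apply List.filter_congr
  intro x _
  simp only [PySem.Dict.contains, hsing, List.any_cons, List.any_nil, Bool.or_false]
  by_cases hxk : x.1 = k
  · simp [hxk]
  · rw [beq_eq_false_iff_ne.mpr (fun e => hxk e.symm), beq_eq_false_iff_ne.mpr hxk]

lemma pvSpecAnc_step (pd hd : PySem.Dict Int Int) (maxh : Int) (f : Nat) (node p : Int)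
    (hp : pd.get? node = some p) (he : pvEscapes pd f p = true) :
    pvSpecAnc pd hd maxh (f+1) node =
      (let h := hd.getD p (-1)
       let base := pvSpecAnc pd hd maxh (f+1) p
       if 1 ≤ h ∧ h ≤ maxh then
         PySem.Dict.mk ((h, base.getD h p) :: base.items.filter (fun kv => !(kv.1 == h)))
       else base) := by
  have hch : pvChain pd (f+1) node = p :: pvChain pd (f+1) p := by
    conv_lhs => rw [pvChain]
    simp only [hp]
    rw [pvChain_stable pd f p he]
  show pvSpecAnc pd hd maxh (f+1) node = _
  simp only [pvSpecAnc, hch, pvPairs, List.filterMap_cons]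
  by_cases hr : 1 ≤ hd.getD p (-1) ∧ hd.getD p (-1) ≤ maxh
  · simp only [if_pos hr]
    rw [pvBuild_cons_empty]
  · simp only [if_neg hr]

def pvInv (pd hd : PySem.Dict Int Int) (maxh : Int) (F : Nat)
    (cache : PySem.Dict Int (PySem.Dict Int Int)) : Prop :=
  cache.keys.Nodup ∧
  ∀ n d, cache.get? n = some d → pvEscapes pd F n = true ∧ d = pvSpecAnc pd hd maxh F n

lemma pvTerminal_ok (pd hd : PySem.Dict Int Int) (maxh : Int) (g : Nat)
    (cur : Int) (cache : PySem.Dict Int (PySem.Dict Int Int))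
    (hInv : pvInv pd hd maxh (g+1) cache)
    (hcond : cache.contains cur = true ∨ pd.contains cur = false) :
    pvInv pd hd maxh (g+1) (if cache.contains cur then cache else cache.insert cur PySem.Dict.empty) ∧
    (if cache.contains cur then cache else cache.insert cur PySem.Dict.empty).get? cur
      = some (pvSpecAnc pd hd maxh (g+1) cur) := by
  by_cases hcc : cache.contains cur = true
  · rw [if_pos hcc]
    refine ⟨hInv, ?_⟩
    have hsome : (cache.get? cur).isSome := by rw [← PySem.Dict.contains_eq_isSome_get?, hcc]
    obtain ⟨d, hd'⟩ := Option.isSome_iff_exists.mp hsome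
    rw [hd', (hInv.2 cur d hd').2]
  · rw [if_neg hcc]
    have hpc : pd.contains cur = false := by
      rcases hcond with h | h
      · exact absurd h hcc
      · exact h
    have hspec : pvSpecAnc pd hd maxh (g+1) cur = PySem.Dict.empty := by
      simp [pvSpecAnc, pvChain, pv_not_contains_get? pd cur hpc, pvPairs, pvBuild]
    have hesc : pvEscapes pd (g+1) cur = true := by
      simp [pvEscapes, hpc]
    refine ⟨⟨PySem.Dict.nodup_keys_insert _ _ _ hInv.1, ?_⟩, ?_⟩
    · intro n d hget
      by_cases hn : n = cur
      · subst hn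
        rw [PySem.Dict.get?_insert_self] at hget
        cases hget
        exact ⟨hesc, hspec.symm⟩
      · rw [PySem.Dict.get?_insert_of_ne _ _ hn] at hget
        exact hInv.2 n d hget
    · rw [PySem.Dict.get?_insert_self, hspec]

lemma pvProcessLeaf_ok (pd hd : PySem.Dict Int Int) (maxh : Int) (g : Nat) :
    ∀ (f : Nat) (cur : Int) (cache : PySem.Dict Int (PySem.Dict Int Int)),
      f ≤ g + 1 → pvInv pd hd maxh (g+1) cache → pvEscapes pd f cur = true →
      pvInv pd hd maxh (g+1)
        ((pvCollect cache pd f cur []).1.reverse.foldl (pvFillStep pd hd maxh)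
          (if cache.contains (pvCollect cache pd f cur []).2 then cache
           else cache.insert (pvCollect cache pd f cur []).2 PySem.Dict.empty)) ∧
      ((pvCollect cache pd f cur []).1.reverse.foldl (pvFillStep pd hd maxh)
          (if cache.contains (pvCollect cache pd f cur []).2 then cache
           else cache.insert (pvCollect cache pd f cur []).2 PySem.Dict.empty)).get? cur
        = some (pvSpecAnc pd hd maxh (g+1) cur) := by
  intro f
  induction f with
  | zero =>
    intro cur cache hle hInv hesc
    have hpc : pd.contains cur = false := by
      simpa [pvEscapes] using hesc
    simpa [pvCollect] using pvTerminal_ok pd hd maxh g cur cache hInv (Or.inr hpc)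
  | succ f ih =>
    intro cur cache hle hInv hesc
    by_cases hcc : cache.contains cur = true
    · have hcol : pvCollect cache pd (f+1) cur [] = ([], cur) := by
        rw [pvCollect]
        rw [if_neg (by simp [hcc])]
      rw [hcol]
      simpa using pvTerminal_ok pd hd maxh g cur cache hInv (Or.inl hcc)
    · by_cases hpc : pd.contains cur = true
      · -- loop iterates
        have hsome : (pd.get? cur).isSome := by rw [← PySem.Dict.contains_eq_isSome_get?, hpc]
        obtain ⟨p, hpget⟩ := Option.isSome_iff_exists.mp hsome
        have hgdp : pd.getD cur 0 = p := PySem.Dict.getD_of_get?_eq_some pd 0 hpget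
        have hescp : pvEscapes pd f p = true := by
          have := hesc
          simp only [pvEscapes, hpc, Bool.not_true, Bool.false_or] at this
          rwa [hgdp] at this
        have hcol : pvCollect cache pd (f+1) cur []
            = ([cur] ++ (pvCollect cache pd f p []).1, (pvCollect cache pd f p []).2) := by
          rw [pvCollect]
          rw [if_pos (by simp [hcc, hpc])]
          rw [hgdp]
          exact pvCollect_append cache pd f p [cur]
        obtain ⟨hI2, hg2⟩ := ih p cache (by omega) hInv hescp
        set t' := (pvCollect cache pd f p []).1 with ht'
        set e' := (pvCollect cache pd f p []).2 with he'
        set c1 := (if cache.contains e' then cache else cache.insert e' PySem.Dict.empty) with hc1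
        set c2 := t'.reverse.foldl (pvFillStep pd hd maxh) c1 with hc2
        have hfold : (([cur] ++ t').reverse).foldl (pvFillStep pd hd maxh) c1
            = pvFillStep pd hd maxh c2 cur := by
          rw [List.reverse_append, List.reverse_singleton, List.foldl_append]
          rfl
        have hbase : c2.getD p PySem.Dict.empty = pvSpecAnc pd hd maxh (g+1) p :=
          PySem.Dict.getD_of_get?_eq_some c2 PySem.Dict.empty hg2
        have hescg : pvEscapes pd g p = true := pvEscapes_le pd f g p (by omega) hescp
        have hfill : pvFillStep pd hd maxh c2 cur = c2.insert cur (pvSpecAnc pd hd maxh (g+1) cur) := by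
          rw [pvFillStep]
          simp only [hgdp, hbase]
          congr 1
          rw [pvSpecAnc_step pd hd maxh g cur p hpget hescg]
          by_cases hr : 1 ≤ hd.getD p (-1) ∧ hd.getD p (-1) ≤ maxh
          · simp only [if_pos hr]
            rw [pvFillStep_d _ p _ (pvSpecAnc_nodup pd hd maxh (g+1) p)]
          · simp only [if_neg hr]
        rw [hcol]
        simp only
        rw [hfold, hfill]
        have hesccur : pvEscapes pd (g+1) cur = true := pvEscapes_le pd (f+1) (g+1) cur hle hesc
        refine ⟨⟨PySem.Dict.nodup_keys_insert _ _ _ hI2.1, ?_⟩, ?_⟩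
        · intro n d hget
          by_cases hn : n = cur
          · subst hn
            rw [PySem.Dict.get?_insert_self] at hget
            cases hget
            exact ⟨hesccur, rfl⟩
          · rw [PySem.Dict.get?_insert_of_ne _ _ hn] at hget
            exact hI2.2 n d hget
        · rw [PySem.Dict.get?_insert_self]
      · have hcol : pvCollect cache pd (f+1) cur [] = ([], cur) := by
          rw [pvCollect]
          rw [if_neg (by simp [hpc])]
        rw [hcol]
        simpa using pvTerminal_ok pd hd maxh g cur cache hInv (Or.inr (by simpa using hpc))

lemma pvMain (pd hd : PySem.Dict Int Int) (maxh : Int) (g : Nat) :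
    ∀ (leafs : List Int) (r cache : PySem.Dict Int (PySem.Dict Int Int)),
      pvInv pd hd maxh (g+1) cache → (∀ l ∈ leafs, pvEscapes pd (g+1) l = true) →
      leafs.foldl (fun r l => r.insert l (pvWalkA pd hd maxh (g+1) l PySem.Dict.empty)) r
        = (leafs.foldl
            (fun (rc : PySem.Dict Int (PySem.Dict Int Int) × PySem.Dict Int (PySem.Dict Int Int)) leaf =>
              let c' := pvProcessLeaf pd hd maxh (g+1) rc.2 leaf
              (rc.1.insert leaf (c'.getD leaf PySem.Dict.empty), c'))
            (r, cache)).1 := by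
  intro leafs
  induction leafs with
  | nil => intro r cache _ _; simp
  | cons l ls ih =>
    intro r cache hInv hesc
    obtain ⟨hI2, hg2⟩ := pvProcessLeaf_ok pd hd maxh g (g+1) l cache (le_refl _) hInv (hesc l (by simp))
    have hc' : pvProcessLeaf pd hd maxh (g+1) cache l
        = (pvCollect cache pd (g+1) l []).1.reverse.foldl (pvFillStep pd hd maxh)
          (if cache.contains (pvCollect cache pd (g+1) l []).2 then cache
           else cache.insert (pvCollect cache pd (g+1) l []).2 PySem.Dict.empty) := rfl
    have hv : (pvProcessLeaf pd hd maxh (g+1) cache l).getD l PySem.Dict.empty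
        = pvSpecAnc pd hd maxh (g+1) l := by
      rw [hc']; exact PySem.Dict.getD_of_get?_eq_some _ _ hg2
    have hw : pvWalkA pd hd maxh (g+1) l PySem.Dict.empty = pvSpecAnc pd hd maxh (g+1) l := by
      rw [pvWalkA_eq_build]; rfl
    conv_lhs => rw [List.foldl_cons]
    conv_rhs => rw [List.foldl_cons]
    rw [hw]
    show _ = (List.foldl _
      ((r.insert l ((pvProcessLeaf pd hd maxh (g+1) cache l).getD l PySem.Dict.empty)),
        pvProcessLeaf pd hd maxh (g+1) cache l) ls).1
    rw [hv]
    exact ih (r.insert l (pvSpecAnc pd hd maxh (g+1) l)) (pvProcessLeaf pd hd maxh (g+1) cache l)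
      (by rw [hc']; exact hI2) (fun x hx => hesc x (by simp [hx]))

lemma pvEscapes_of_iter (po : List (Int × Int)) :
    ∀ (f : Nat) (l : Int), (∃ n, n ≤ f ∧ (pvParent po)^[n] l ∉ (PySem.Dict.mk po).keys) →
      pvEscapes (PySem.Dict.mk po) f l = true := by
  intro f
  induction f with
  | zero =>
    intro l ⟨n, hn, hout⟩
    have hn0 : n = 0 := by omega
    subst hn0
    simp only [Function.iterate_zero, id_eq] at hout
    simp only [pvEscapes, Bool.not_eq_true', ← Bool.not_eq_true]
    exact fun hc => hout ((PySem.Dict.contains_iff_mem_keys _ _).mp hc)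
  | succ f ih =>
    intro l ⟨n, hn, hout⟩
    by_cases hc : (PySem.Dict.mk po).contains l = true
    · have hn0 : n ≠ 0 := by
        intro h0
        subst h0
        simp only [Function.iterate_zero, id_eq] at hout
        exact hout ((PySem.Dict.contains_iff_mem_keys _ _).mp hc)
      obtain ⟨m, rfl⟩ := Nat.exists_eq_succ_of_ne_zero hn0
      have hsome : ((PySem.Dict.mk po).get? l).isSome := by
        rw [← PySem.Dict.contains_eq_isSome_get?, hc]
      obtain ⟨p, hpget⟩ := Option.isSome_iff_exists.mp hsome
      have hstep : pvParent po l = p := by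
        unfold pvParent
        exact PySem.Dict.getD_of_get?_eq_some _ l hpget
      have hiter : (pvParent po)^[m] p ∉ (PySem.Dict.mk po).keys := by
        rw [Function.iterate_succ_apply, hstep] at hout
        exact hout
      have hrec : pvEscapes (PySem.Dict.mk po) f p = true := ih p ⟨m, by omega, hiter⟩
      simp only [pvEscapes, hc, Bool.not_true, Bool.false_or]
      rw [PySem.Dict.getD_of_get?_eq_some _ 0 hpget]
      exact hrec
    · simp [pvEscapes, hc]

-- ===== VERDICT (by name: the statement is the Claim_ definition above) =====
theorem compute_leaf_ancestors_spec : Claim_equal_compute_leaf_ancestors := by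
  unfold Claim_equal_compute_leaf_ancestors
  intro leaf_ids parent_of height_of max_height hdom hpre
  unfold Spec_compute_leaf_ancestors
  unfold compute_leaf_ancestors compute_leaf_ancestors_alt
  simp only
  rw [pvMain (PySem.Dict.mk parent_of) (PySem.Dict.mk height_of) max_height parent_of.length
    leaf_ids PySem.Dict.empty PySem.Dict.empty
    ⟨PySem.Dict.nodup_keys_empty, fun n d h => by rw [PySem.Dict.get?_empty] at h; cases h⟩
    (fun l hl => by
      obtain ⟨n, hn, hout⟩ := hpre l hl
      exact pvEscapes_of_iter parent_of (parent_of.length + 1) l ⟨n, by omega, hout⟩)]
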